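-- pv_equiv track=rewrite | github.com/heeheejj/Algorithm_BOJ | boj/string/1316.py | isGroupWord
-- ===== SOURCE A (Python) =====
-- def isGroupWord(word):
--   alph = list()
--   for i in range(len(word)):
--     temp_alph = word[i]
--     if temp_alph not in alph:  # 지금까지 확인한 알파벳 리스트에 없으면 추가
--       alph.append(temp_alph)
--     else:  # 리스트에 있으면,
--       if temp_alph != word[i-1]:  # 리스트에 있는데 이전 인덱스의 단어와 일치하지 않으면 그룹단어가 아님
--         return False
--   return True
-- ===== SOURCE B (Python) =====
-- def isGroupWord(word):
--     # collapse consecutive duplicates into run representatives,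
--     # then the word is a group word iff all representatives are distinct
--     reps = []
--     for c in word:
--         if not reps or reps[-1] != c:
--             reps.append(c)
--     return len(reps) == len(set(reps))
-- ===== Notes on version B (the rewrite author's own statement) =====
-- stated objective: simpler
-- what changed: Replaces A's seen-list membership plus previous-character branching with a two-stage computation: collapse consecutive duplicates into run representatives, then check the representatives are all distinct by comparing lengths with the deduplicated set.
import Mathlib
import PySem

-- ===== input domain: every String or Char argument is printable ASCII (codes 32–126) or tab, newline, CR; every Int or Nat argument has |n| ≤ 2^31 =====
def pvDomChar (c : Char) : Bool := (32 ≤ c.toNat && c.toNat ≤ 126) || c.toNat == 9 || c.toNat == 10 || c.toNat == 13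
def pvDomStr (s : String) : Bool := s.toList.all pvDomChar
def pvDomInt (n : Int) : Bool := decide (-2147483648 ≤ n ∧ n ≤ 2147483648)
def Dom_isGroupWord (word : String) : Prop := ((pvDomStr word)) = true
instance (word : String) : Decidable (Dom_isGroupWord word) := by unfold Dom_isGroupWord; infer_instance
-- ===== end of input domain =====

-- B collapses the word into run representatives and checks they are distinct,
-- replacing A's seen-list membership + previous-character branching (objective: simpler).

-- ===== PORT A =====
-- the indexed for-loop of A, with early return False; temp_alph = word[i] = cs[i]
def isGroupWordLoop (cs : List Char) (alph : List Char) (i : Nat) : Bool :=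
  if h : i < cs.length then
    if ¬ alph.contains cs[i] then
      isGroupWordLoop cs (alph ++ [cs[i]]) (i + 1)
    else
      if PySem.List.pyGet? cs ((i : Int) - 1) ≠ some cs[i] then false
      else isGroupWordLoop cs alph (i + 1)
  else true
termination_by cs.length - i

def isGroupWord (word : String) : Bool := isGroupWordLoop word.toList [] 0

-- ===== PORT B =====
-- reps accumulation loop of Source B: append c unless reps is nonempty and reps[-1] == c
def isGroupWordReps (cs : List Char) : List Char :=
  cs.foldl (fun reps c => if reps.getLast? ≠ some c then reps ++ [c] else reps) []

def isGroupWord_alt (word : String) : Bool :=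
  let reps := isGroupWordReps word.toList
  reps.length == (PySem.Set.ofList reps).length

-- ===== PRECONDITION & SPEC =====
def Spec_isGroupWord (word : String) (out : Bool) : Prop := out = isGroupWord_alt word
instance (word : String) (out : Bool) : Decidable (Spec_isGroupWord word out) := by unfold Spec_isGroupWord; infer_instance

-- ===== CLAIM (what is proved, stated in full; the proofs are below) =====
def Claim_equal_isGroupWord : Prop := ∀ (word : String), Dom_isGroupWord word → Spec_isGroupWord word (isGroupWord word)

-- ===== LEMMAS AND PROOFS =====

-- run representatives of l, continuing a current run of p
def cAux (p : Char) : List Char → List Char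
  | [] => []
  | c :: rest => if c = p then cAux p rest else c :: cAux c rest

theorem foldl_reps_eq (l : List Char) : ∀ (acc : List Char) (p : Char), acc.getLast? = some p →
    l.foldl (fun reps c => if reps.getLast? ≠ some c then reps ++ [c] else reps) acc
      = acc ++ cAux p l := by
  induction l with
  | nil => intro acc p h; simp [cAux]
  | cons c rest ih =>
    intro acc p h
    by_cases hc : c = p
    · subst hc
      simp only [List.foldl_cons, h]
      rw [if_neg (not_ne_iff.mpr rfl)]
      rw [ih acc c h]
      simp [cAux]
    · have hne : acc.getLast? ≠ some c := by
        rw [h]; exact fun e => hc (Option.some.inj e).symm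
      simp only [List.foldl_cons, if_pos hne, cAux, if_neg hc]
      rw [ih (acc ++ [c]) c (by simp)]
      simp

theorem foldl_add_len_le (l : List Char) : ∀ (s : List Char),
    (l.foldl PySem.Set.add s).length ≤ s.length + l.length := by
  induction l with
  | nil => intro s; simp
  | cons c rest ih =>
    intro s
    simp only [List.foldl_cons, PySem.Set.add]
    split_ifs with h
    · have := ih s; simp only [List.length_cons]; omega
    · have := ih (s ++ [c])
      simp only [List.length_append, List.length_cons, List.length_nil] at this ⊢
      omega

theorem foldl_add_len_eq_iff (l : List Char) : ∀ (s : List Char), s.Nodup →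
    ((l.foldl PySem.Set.add s).length = s.length + l.length ↔ (s ++ l).Nodup) := by
  induction l with
  | nil => intro s hs; simpa using hs
  | cons c rest ih =>
    intro s hs
    simp only [List.foldl_cons, PySem.Set.add]
    split_ifs with h
    · have hle := foldl_add_len_le rest s
      have hmem : c ∈ s := by simpa using h
      constructor
      · intro he; simp only [List.length_cons] at he; omega
      · intro hn
        have hdisj := List.disjoint_of_nodup_append hn
        exact (hdisj hmem (List.mem_cons_self ..)).elim
    · have hmem : c ∉ s := by simpa using h
      have hnd : (s ++ [c]).Nodup := hs.append (List.nodup_singleton c)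
        (fun a ha hb => hmem ((List.mem_singleton.mp hb) ▸ ha))
      have hiff := ih (s ++ [c]) hnd
      rw [show s ++ c :: rest = (s ++ [c]) ++ rest by simp]
      constructor
      · intro he
        exact hiff.mp (by simp only [List.length_append, List.length_cons, List.length_nil] at he ⊢; omega)
      · intro hn
        have := hiff.mpr hn
        simp only [List.length_append, List.length_cons, List.length_nil] at this ⊢
        omega

theorem len_eq_ofList_iff_nodup (l : List Char) :
    (l.length == (PySem.Set.ofList l).length) = decide l.Nodup := by
  have hof : PySem.Set.ofList l = l.foldl PySem.Set.add [] := PySem.Set.ofList_eq_foldl l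
  have hiff := foldl_add_len_eq_iff l [] (by simp)
  simp only [List.length_nil, Nat.zero_add, List.nil_append] at hiff
  by_cases hn : l.Nodup
  · simp [hof, hiff.mpr hn, hn]
  · have hne : l.length ≠ (l.foldl PySem.Set.add []).length := fun e => hn (hiff.mp e.symm)
    simp [hof, hn, hne]

theorem loop_eq_nodup (cs : List Char) : ∀ (k i : Nat), cs.length - i = k →
    ∀ (alph : List Char) (p : Char), i ≤ cs.length →
    PySem.List.pyGet? cs ((i : Int) - 1) = some p → p ∈ alph → alph.Nodup →
    isGroupWordLoop cs alph i = decide (alph ++ cAux p (cs.drop i)).Nodup := by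
  intro k
  induction k with
  | zero =>
    intro i hk alph p hle _ _ hnd
    have hi : i = cs.length := by omega
    rw [isGroupWordLoop]
    simp [hi, cAux, hnd]
  | succ k ih =>
    intro i hk alph p hle hprev hmem hnd
    have hlt : i < cs.length := by omega
    have hdrop : cs.drop i = cs[i] :: cs.drop (i + 1) := (List.drop_eq_getElem_cons hlt).symm ▸ rfl
    have hnext : PySem.List.pyGet? cs (((i + 1 : Nat) : Int) - 1) = some cs[i] := by
      have he : ((i + 1 : Nat) : Int) - 1 = ((i : Nat) : Int) := by push_cast; ring
      rw [he, PySem.List.pyGet?_natCast]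
      simp [hlt]
    rw [isGroupWordLoop]
    rw [dif_pos hlt]
    by_cases hin : cs[i] ∈ alph
    · -- temp already in alph
      rw [if_neg (by simp [hin])]
      by_cases hpe : cs[i] = p
      · -- matches previous char: continue
        rw [if_neg (by rw [hprev, hpe]; exact not_ne_iff.mpr rfl)]
        rw [ih (i + 1) (by omega) alph cs[i] (by omega) hnext hin hnd]
        rw [hdrop]
        rw [show cAux p (cs[i] :: cs.drop (i + 1)) = cAux p (cs.drop (i + 1)) from by
          simp [cAux, hpe]]
        rw [hpe]
      · -- differs from previous char: return False
        rw [if_pos (by rw [hprev]; exact fun e => hpe (Option.some.inj e).symm)]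
        have hbad : ¬ (alph ++ cs[i] :: cAux cs[i] (cs.drop (i + 1))).Nodup := fun hn =>
          (List.disjoint_of_nodup_append hn) hin (List.mem_cons_self ..)
        rw [hdrop]
        rw [show cAux p (cs[i] :: cs.drop (i + 1)) = cs[i] :: cAux cs[i] (cs.drop (i + 1)) from by
          simp [cAux, hpe]]
        simp [hbad]
    · -- temp not yet in alph: append
      rw [if_pos (by simp [hin])]
      have hpe : cs[i] ≠ p := fun e => hin (e ▸ hmem)
      have hnd' : (alph ++ [cs[i]]).Nodup := hnd.append (List.nodup_singleton _)
        (fun a ha hb => hin ((List.mem_singleton.mp hb) ▸ ha))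
      rw [ih (i + 1) (by omega) (alph ++ [cs[i]]) cs[i] (by omega) hnext (by simp) hnd']
      rw [hdrop]
      rw [show cAux p (cs[i] :: cs.drop (i + 1)) = cs[i] :: cAux cs[i] (cs.drop (i + 1)) from by
        simp [cAux, hpe]]
      simp

-- ===== VERDICT (by name: the statement is the Claim_ definition above) =====
theorem isGroupWord_spec : Claim_equal_isGroupWord := by
  intro word _
  unfold Spec_isGroupWord isGroupWord isGroupWord_alt isGroupWordReps
  cases hcs : word.toList with
  | nil =>
    rw [isGroupWordLoop]
    simp [PySem.Set.ofList]
  | cons c rest =>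
    -- A side: unfold the first iteration, then apply loop_eq_nodup at i = 1
    have hA : isGroupWordLoop (c :: rest) [] 0 = decide ((c :: cAux c rest)).Nodup := by
      rw [isGroupWordLoop]
      rw [dif_pos (by simp)]
      rw [if_pos (by simp)]
      simp only [List.getElem_cons_zero, List.nil_append]
      have h0 : PySem.List.pyGet? (c :: rest) ((1 : Int) - 1) = some c := by
        norm_num [PySem.List.pyGet?, PySem.List.pyIdx?]
      have := loop_eq_nodup (c :: rest) rest.length 1 (by simp) [c] c (by simp) h0
        (by simp) (by simp)
      simpa using this
    -- B side: the reps foldl computes c :: cAux c rest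
    have hB : (c :: rest).foldl
        (fun reps c => if reps.getLast? ≠ some c then reps ++ [c] else reps) []
        = c :: cAux c rest := by
      simp only [List.foldl_cons]
      rw [if_pos (by simp)]
      simpa using foldl_reps_eq rest [c] c (by simp)
    rw [hA]
    simp only [hB, len_eq_ofList_iff_nodup]
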